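-- pv_equiv track=rewrite | github.com/jcolinpatrick/kryptos | scripts/examples/t16_solve_v2.py | autokey_beau_pt_decrypt
-- ===== SOURCE A (Python) =====
-- ALPHA = "ABCDEFGHIJKLMNOPQRSTUVWXYZ"
--
-- def autokey_beau_pt_decrypt(ct: str, primer: str) -> str:
--     """Beaufort autokey, PT-keyed"""
--     pt = []
--     key = list(primer)
--     for i, c in enumerate(ct):
--         k = ALPHA.index(key[i])
--         p = (k - ALPHA.index(c)) % 26
--         pt.append(ALPHA[p])
--         key.append(ALPHA[p])
--     return "".join(pt)
-- ===== SOURCE B (Python) =====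
-- ALPHA = "ABCDEFGHIJKLMNOPQRSTUVWXYZ"
--
-- def autokey_beau_pt_decrypt(ct: str, primer: str) -> str:
--     """Beaufort autokey, PT-keyed, block-recursive: because the key stream is
--     primer + plaintext, each decrypted block is exactly the key for the next
--     block, so we decrypt block-by-block with no per-character key bookkeeping."""
--     if not ct:
--         return ""
--     block = "".join(ALPHA[(ALPHA.index(k) - ALPHA.index(c)) % 26]
--                     for k, c in zip(primer, ct))
--     return block + autokey_beau_pt_decrypt(ct[len(primer):], block)
-- ===== Notes on version B (the rewrite author's own statement) =====
-- stated objective: alternative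
-- what changed: B replaces A's per-character loop with a growing mutable key buffer by a block recursion: since the key stream is primer + plaintext, each decrypted block is literally the key for the next block, so B decrypts min(len(primer),rest) characters at a time with zip and recurses on the remaining ciphertext keyed by the block just produced, maintaining no state at all.
import Mathlib
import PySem

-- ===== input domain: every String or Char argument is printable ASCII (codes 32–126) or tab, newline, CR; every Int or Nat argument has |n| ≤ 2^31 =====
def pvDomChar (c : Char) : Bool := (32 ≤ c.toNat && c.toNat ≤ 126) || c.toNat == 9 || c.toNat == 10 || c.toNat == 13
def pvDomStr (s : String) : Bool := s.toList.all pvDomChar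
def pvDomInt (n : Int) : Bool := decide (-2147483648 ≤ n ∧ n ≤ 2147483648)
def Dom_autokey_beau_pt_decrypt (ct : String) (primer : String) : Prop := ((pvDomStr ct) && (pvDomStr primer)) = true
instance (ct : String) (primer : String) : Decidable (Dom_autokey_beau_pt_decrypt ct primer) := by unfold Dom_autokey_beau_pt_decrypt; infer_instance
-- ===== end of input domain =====

-- B replaces A's per-character loop with a mutable key buffer by a block recursion
-- (each decrypted block is the key for the next block); objective: alternative.

-- ===== PORT A =====
def pvAlpha : List Char :=
  ['A','B','C','D','E','F','G','H','I','J','K','L','M','N','O','P','Q','R','S','T','U','V','W','X','Y','Z']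

-- ALPHA.index(c); Python raises ValueError when c ∉ ALPHA — those inputs are outside
-- Pre_, so the getD 0 default is never reached on admitted inputs.
def pvIdxA (c : Char) : Int := ((PySem.List.index? pvAlpha c).getD 0 : Nat)

-- the for-loop of A: state (i, pt, key); key[i] via getD (IndexError → outside Pre_).
-- `% 26`: Python's % agrees with Lean's Int.emod for the positive divisor 26.
def pvALoop : List Char → Nat → List Char → List Char → List Char
  | [], _, pt, _ => pt
  | c :: cs, i, pt, key =>
    let k := pvIdxA (key.getD i 'A')
    let p := (k - pvIdxA c) % 26
    let pc := pvAlpha.getD p.toNat 'A'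
    pvALoop cs (i + 1) (pt ++ [pc]) (key ++ [pc])

def autokey_beau_pt_decrypt (ct : String) (primer : String) : String :=
  String.mk (pvALoop ct.toList 0 [] primer.toList)

-- ===== PORT B =====
-- B's recursion, step for step; Python's zip(primer, ct) is List.zipWith (truncating).
-- The recursion is run on fuel = |ct|: with primer ≠ '' each call strictly shortens ct,
-- so fuel never runs out on inputs admitted by Pre_ (with primer = '' and ct ≠ '' the
-- Python recurses forever — RecursionError — and those inputs are outside Pre_).
def pvBRec : Nat → List Char → List Char → List Char
  | 0, _, _ => []
  | fuel + 1, cs, key =>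
    if cs = [] then []
    else
      let block := List.zipWith (fun k c => pvAlpha.getD ((pvIdxA k - pvIdxA c) % 26).toNat 'A') key cs
      block ++ pvBRec fuel (cs.drop key.length) block

def autokey_beau_pt_decrypt_alt (ct : String) (primer : String) : String :=
  String.mk (pvBRec ct.toList.length ct.toList primer.toList)

-- ===== PRECONDITION & SPEC =====
def pvIsUpper (c : Char) : Bool := 65 ≤ c.toNat && c.toNat ≤ 90

-- Pre_ = exactly the inputs where the Pythons return: every ciphertext char is A–Z, the
-- used primer prefix is A–Z (else ValueError from ALPHA.index), and primer nonempty when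
-- ct is nonempty (else A's key lookup at position 0 raises IndexError; B recurses forever).
def Pre_autokey_beau_pt_decrypt (ct : String) (primer : String) : Prop :=
  (ct.toList ≠ [] → primer.toList ≠ []) ∧
  ct.toList.all pvIsUpper = true ∧
  (primer.toList.take ct.toList.length).all pvIsUpper = true
instance (ct : String) (primer : String) : Decidable (Pre_autokey_beau_pt_decrypt ct primer) := by unfold Pre_autokey_beau_pt_decrypt; infer_instance

def pvWitness_autokey_beau_pt_decrypt : String × String := ("HELLO", "KEY")

def Spec_autokey_beau_pt_decrypt (ct : String) (primer : String) (out : String) : Prop := out = autokey_beau_pt_decrypt_alt ct primer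
instance (ct : String) (primer : String) (out : String) : Decidable (Spec_autokey_beau_pt_decrypt ct primer out) := by unfold Spec_autokey_beau_pt_decrypt; infer_instance

-- ===== CLAIM (what is proved, stated in full; the proofs are below) =====
def Claim_equal_autokey_beau_pt_decrypt : Prop := ∀ (ct : String) (primer : String), Dom_autokey_beau_pt_decrypt ct primer → Pre_autokey_beau_pt_decrypt ct primer → Spec_autokey_beau_pt_decrypt ct primer (autokey_beau_pt_decrypt ct primer)

-- ===== LEMMAS AND PROOFS =====

-- the common reference value: plaintext index at position i (pvVV) and key index (pvK)
def pvVV (primerL ctL : List Char) (m : Nat) : Nat → Int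
  | i =>
    ((if _h : i < m ∨ m = 0 then pvIdxA (primerL.getD i 'A') else pvVV primerL ctL m (i - m))
      - pvIdxA (ctL.getD i 'A')) % 26
  termination_by i => i
  decreasing_by omega

def pvK (primerL ctL : List Char) (m : Nat) (i : Nat) : Int :=
  if i < m then pvIdxA (primerL.getD i 'A') else pvVV primerL ctL m (i - m)

def pvTC (primerL ctL : List Char) (m : Nat) (i : Nat) : Char :=
  pvAlpha.getD (pvVV primerL ctL m i).toNat 'A'

lemma pvVV_eq (primerL ctL : List Char) (m : Nat) (hm : 1 ≤ m) (i : Nat) :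
    pvVV primerL ctL m i = (pvK primerL ctL m i - pvIdxA (ctL.getD i 'A')) % 26 := by
  rw [pvVV, pvK]
  by_cases h : i < m
  · simp [h]
  · have h0 : m ≠ 0 := by omega
    simp [h, h0]

lemma pvVV_nonneg (primerL ctL : List Char) (m i : Nat) : 0 ≤ pvVV primerL ctL m i := by
  rw [pvVV]; exact Int.emod_nonneg _ (by norm_num)

lemma pvVV_lt (primerL ctL : List Char) (m i : Nat) : pvVV primerL ctL m i < 26 := by
  rw [pvVV]; exact Int.emod_lt_of_pos _ (by norm_num)

-- roundtrip: ALPHA.index(ALPHA[k]) = k for k < 26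
lemma pv_roundtrip (k : Nat) (hk : k < 26) : pvIdxA (pvAlpha.getD k 'A') = (k : Int) := by
  interval_cases k <;> rfl

lemma pv_roundtrip' (primerL ctL : List Char) (m i : Nat) :
    pvIdxA (pvTC primerL ctL m i) = pvVV primerL ctL m i := by
  have h0 := pvVV_nonneg primerL ctL m i
  have h1 := pvVV_lt primerL ctL m i
  have := pv_roundtrip (pvVV primerL ctL m i).toNat (by omega)
  rw [pvTC, this]; omega

lemma pv_getD_drop (l : List Char) (t j : Nat) :
    (l.drop t).getD j 'A' = l.getD (t + j) 'A' := by
  simp [List.getD, List.getElem?_drop]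

-- A's loop computes the reference plaintext
lemma pvA_main (primerL ctL : List Char) (hm : 1 ≤ primerL.length) :
    ∀ (cs pt : List Char) (t : Nat), cs = ctL.drop t → t ≤ ctL.length →
      pt = (List.range t).map (pvTC primerL ctL primerL.length) →
      pvALoop cs t pt (primerL ++ pt)
        = (List.range ctL.length).map (pvTC primerL ctL primerL.length) := by
  intro cs
  induction cs with
  | nil =>
    intro pt t hcs ht hpt
    have : ctL.length ≤ t := by
      by_contra h
      have := List.drop_eq_nil_iff.mp hcs.symm
      omega
    have ht' : t = ctL.length := by omega
    simp [pvALoop, hpt, ht']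
  | cons c cs ih =>
    intro pt t hcs ht hpt
    have htn : t < ctL.length := by
      by_contra h
      rw [List.drop_eq_nil_of_le (by omega)] at hcs; simp at hcs
    have hc : ctL.getD t 'A' = c := by
      have := pv_getD_drop ctL t 0
      rw [← hcs] at this; simpa using this.symm
    have hptlen : pt.length = t := by simp [hpt]
    -- the key char at position t
    have hkey : pvIdxA ((primerL ++ pt).getD t 'A') = pvK primerL ctL primerL.length t := by
      by_cases h : t < primerL.length
      · rw [pvK]
        simp [h, List.getD, List.getElem?_append_left h]
      · rw [pvK]
        have h2 : primerL.length ≤ t := by omega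
        have h3 : t - primerL.length < pt.length := by omega
        have : (primerL ++ pt).getD t 'A' = pt.getD (t - primerL.length) 'A' := by
          simp [List.getD, List.getElem?_append_right h2]
        rw [this]
        have : pt.getD (t - primerL.length) 'A' = pvTC primerL ctL primerL.length (t - primerL.length) := by
          rw [hpt]
          simp [List.getD, List.getElem?_map, List.getElem?_range (by simpa [hpt] using h3 : t - primerL.length < t)]
        rw [this, pv_roundtrip']
        simp [h]
    simp only [pvALoop]
    have hp : (pvIdxA ((primerL ++ pt).getD t 'A') - pvIdxA c) % 26
        = pvVV primerL ctL primerL.length t := by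
      rw [hkey, ← hc, pvVV_eq primerL ctL primerL.length hm]
    rw [hp]
    have happ : primerL ++ pt ++ [pvAlpha.getD (pvVV primerL ctL primerL.length t).toNat 'A']
        = primerL ++ (pt ++ [pvTC primerL ctL primerL.length t]) := by simp [pvTC]
    rw [happ]
    exact ih (pt ++ [pvTC primerL ctL primerL.length t]) (t + 1)
      (by rw [← List.drop_drop, ← hcs]; simp)
      (by omega)
      (by rw [hpt, List.range_succ]; simp)

lemma pvBRec_nil (fuel : Nat) (key : List Char) : pvBRec fuel [] key = [] := by
  cases fuel <;> simp [pvBRec]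

-- B's recursion computes the reference plaintext from position t on
lemma pvB_main (primerL ctL : List Char) (hm : 1 ≤ primerL.length) :
    ∀ (fuel t : Nat) (key : List Char), ctL.length - t ≤ fuel → t ≤ ctL.length →
      key.length = primerL.length →
      (∀ j, j < primerL.length → pvIdxA (key.getD j 'A') = pvK primerL ctL primerL.length (t + j)) →
      pvBRec fuel (ctL.drop t) key
        = (List.range (ctL.length - t)).map (fun j => pvTC primerL ctL primerL.length (t + j)) := by
  intro fuel
  set m := primerL.length with hmdef
  induction fuel with
  | zero =>
    intro t key hfuel ht hkl hkey
    have : t = ctL.length := by omega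
    simp [this, pvBRec]
  | succ fuel ih =>
    intro t key hfuel ht hkl hkey
    by_cases hnil : ctL.drop t = []
    · have : t = ctL.length := by
        have := List.drop_eq_nil_iff.mp hnil; omega
      simp [this, pvBRec]
    · have htn : t < ctL.length := by
        by_contra h
        exact hnil (List.drop_eq_nil_of_le (by omega))
      simp only [pvBRec, if_neg hnil]
      set L := min m (ctL.length - t) with hL
      have hblock : List.zipWith (fun k c => pvAlpha.getD ((pvIdxA k - pvIdxA c) % 26).toNat 'A') key (ctL.drop t)
          = (List.range L).map (fun j => pvTC primerL ctL m (t + j)) := by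
        apply List.ext_getElem
        · simp [hkl, hL]
        · intro j h1 h2
          have hjL : j < L := by simpa using h2
          have hjk : j < key.length := by omega
          have hjd : j < (ctL.drop t).length := by simp; omega
          rw [List.getElem_zipWith]
          rw [List.getElem_map, List.getElem_range]
          have hk : key[j] = key.getD j 'A' := by simp [List.getD, List.getElem?_eq_getElem hjk]
          have hcj : (ctL.drop t)[j] = ctL.getD (t + j) 'A' := by
            rw [← pv_getD_drop]
            simp [List.getD, List.getElem?_eq_getElem hjd]
          rw [hk, hcj, hkey j (by omega)]
          rw [pvTC, pvVV_eq primerL ctL m hm]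
      rw [hblock, hkl]
      by_cases hrest : ctL.length - t ≤ m
      · -- last (possibly partial) block: nothing remains
        have hdrop : (ctL.drop t).drop m = [] := by
          rw [List.drop_drop]
          exact List.drop_eq_nil_of_le (by omega)
        rw [hdrop, pvBRec_nil]
        have : L = ctL.length - t := by omega
        simp [this]
      · -- full block of length m, recurse at t + m
        have hLm : L = m := by omega
        rw [List.drop_drop]
        have hrec := ih (t + m) ((List.range L).map (fun j => pvTC primerL ctL m (t + j)))
          (by omega) (by omega) (by simp [hLm])
          (by
            intro j hj
            have hjL : j < L := by omega
            have : ((List.range L).map (fun j => pvTC primerL ctL m (t + j))).getD j 'A'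
                = pvTC primerL ctL m (t + j) := by
              simp [List.getD, List.getElem?_map, List.getElem?_range hjL]
            rw [this, pv_roundtrip', pvK,
              if_neg (show ¬ (t + m + j < m) by omega)]
            congr 1
            omega)
        rw [hrec]
        -- stitch the two ranges together
        have hsplit : ctL.length - t = L + (ctL.length - (t + m)) := by omega
        rw [hsplit, List.range_add, List.map_append, List.map_map]
        congr 1
        apply List.map_congr_left
        intro j hj
        simp only [Function.comp_apply]
        congr 1
        omega
      
-- ===== VERDICT (by name: the statement is the Claim_ definition above) =====
theorem autokey_beau_pt_decrypt_spec : Claim_equal_autokey_beau_pt_decrypt := by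
  intro ct primer _ hpre
  unfold Spec_autokey_beau_pt_decrypt autokey_beau_pt_decrypt autokey_beau_pt_decrypt_alt
  by_cases hct : ct.toList = []
  · simp [hct, pvALoop, pvBRec_nil]
  · have hm : 1 ≤ primer.toList.length := by
      have := hpre.1 hct
      cases h : primer.toList with
      | nil => exact absurd h this
      | cons a l => simp
    have hA := pvA_main primer.toList ct.toList hm ct.toList [] 0 (by simp) (by omega) (by simp)
    have hB := pvB_main primer.toList ct.toList hm ct.toList.length 0 primer.toList
      (by omega) (by omega) rfl
      (by
        intro j hj
        rw [pvK, if_pos (show 0 + j < primer.toList.length by omega), Nat.zero_add])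
    simp only [List.append_nil] at hA
    simp only [List.drop_zero, Nat.sub_zero, Nat.zero_add] at hB
    rw [hA, hB]
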